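-- pv_equiv track=rewrite | github.com/movie42/algorithm_py | homework/8주차/valueBag.py | solution
-- ===== SOURCE A (Python) =====
-- def solution(N, K1, K2, W, V):
--     answer = 0
--     k1_weight = K1
--     k2_weight = K2
--     item_list = []
--     for i in range(len(W)):
--         item_list.append([W[i], V[i]])
--     item_list = sorted(item_list, key=lambda x: x[1], reverse=True)
--     i = 0
--     j = 0
--     while i < len(item_list):
--         if item_list[i][0] <= k1_weight:
--             answer += item_list[i][1]
--             k1_weight -= item_list[i][0]
--             del item_list[i]
--         else:
--             i += 1
--     while j < len(item_list):
--         if item_list[j][0] <= k2_weight: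
--             answer += item_list[j][1]
--             k2_weight -= item_list[j][0]
--             del item_list[j]
--         else:
--             j += 1
--     return answer
-- ===== SOURCE B (Python) =====
-- def solution(N, K1, K2, W, V):
--     items = sorted(zip(W, V), key=lambda x: x[1], reverse=True)
--     total = 0
--     for w, v in items:
--         if w <= K1:
--             total += v
--             K1 -= w
--         elif w <= K2:
--             total += v
--             K2 -= w
--     return total
-- ===== Notes on version B (the rewrite author's own statement) =====
-- stated objective: simpler
-- what changed: B replaces A's index-building loop and two sequential while-loops with in-place deletions by zip + one fused pass over the sorted items (if fits bag1 / elif fits bag2), tracking both remaining capacities.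
import Mathlib
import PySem

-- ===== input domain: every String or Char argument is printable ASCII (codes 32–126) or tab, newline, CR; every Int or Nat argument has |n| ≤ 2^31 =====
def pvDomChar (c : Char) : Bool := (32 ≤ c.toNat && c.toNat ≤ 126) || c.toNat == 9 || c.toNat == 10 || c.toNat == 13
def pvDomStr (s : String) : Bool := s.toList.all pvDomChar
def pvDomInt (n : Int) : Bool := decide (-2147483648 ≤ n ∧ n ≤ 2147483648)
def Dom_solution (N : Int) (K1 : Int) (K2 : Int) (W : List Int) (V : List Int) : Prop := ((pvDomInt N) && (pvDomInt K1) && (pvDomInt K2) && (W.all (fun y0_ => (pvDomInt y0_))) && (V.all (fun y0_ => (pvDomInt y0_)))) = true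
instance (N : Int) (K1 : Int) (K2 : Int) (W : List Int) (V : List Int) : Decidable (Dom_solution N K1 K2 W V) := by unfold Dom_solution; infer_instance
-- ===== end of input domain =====

-- B fuses A's two deletion passes over the value-sorted list into one if/elif pass over both capacities (simpler; no in-place deletes).

-- ===== PORT A =====
-- item_list built by 'for i in range(len(W)): append([W[i], V[i]])'
def pvBuild (W V : List Int) : List (Int × Int) :=
  (PySem.List.pyRange 0 (W.length : Int) 1).foldl
    (fun acc i => acc ++ [(PySem.List.pyGetD W i 0, PySem.List.pyGetD V i 0)]) []

-- A's while-loop with 'del item_list[i]' on take / 'i += 1' on skip: returns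
-- (answer, remaining capacity, remaining items), examining items left to right.
def pvLoopA : List (Int × Int) → Int → Int → Int × Int × List (Int × Int)
  | [], k, acc => (acc, k, [])
  | (w, v) :: t, k, acc =>
    if w ≤ k then pvLoopA t (k - w) (acc + v)
    else
      let r := pvLoopA t k acc
      (r.1, r.2.1, (w, v) :: r.2.2)

def solution (N : Int) (K1 : Int) (K2 : Int) (W : List Int) (V : List Int) : Int :=
  let items := PySem.List.sorted (pvBuild W V) (fun x => x.2) true
  let r1 := pvLoopA items K1 0        -- first while loop (bag 1)
  let r2 := pvLoopA r1.2.2 K2 r1.1    -- second while loop (bag 2), same code over the leftovers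
  r2.1

-- ===== PORT B =====
-- single for-loop over the sorted pairs: if fits bag1 / elif fits bag2 / else skip
def pvLoopB : List (Int × Int) → Int → Int → Int → Int
  | [], _, _, acc => acc
  | (w, v) :: t, k1, k2, acc =>
    if w ≤ k1 then pvLoopB t (k1 - w) k2 (acc + v)
    else if w ≤ k2 then pvLoopB t k1 (k2 - w) (acc + v)
    else pvLoopB t k1 k2 acc

def solution_alt (N : Int) (K1 : Int) (K2 : Int) (W : List Int) (V : List Int) : Int :=
  pvLoopB (PySem.List.sorted (W.zip V) (fun x => x.2) true) K1 K2 0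

-- ===== PRECONDITION & SPEC =====
-- A reads V[i] for every i < len(W): IndexError (no return) when len(V) < len(W); excluded.
def Pre_solution (N : Int) (K1 : Int) (K2 : Int) (W : List Int) (V : List Int) : Prop :=
  W.length ≤ V.length
instance (N : Int) (K1 : Int) (K2 : Int) (W : List Int) (V : List Int) : Decidable (Pre_solution N K1 K2 W V) := by unfold Pre_solution; infer_instance
def pvWitness_solution : Int × Int × Int × List Int × List Int := (2, 3, 4, [1, 2], [5, 6])

def Spec_solution (N : Int) (K1 : Int) (K2 : Int) (W : List Int) (V : List Int) (out : Int) : Prop := out = solution_alt N K1 K2 W V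
instance (N : Int) (K1 : Int) (K2 : Int) (W : List Int) (V : List Int) (out : Int) : Decidable (Spec_solution N K1 K2 W V out) := by unfold Spec_solution; infer_instance

-- ===== CLAIM (what is proved, stated in full; the proofs are below) =====
def Claim_equal_solution : Prop := ∀ (N : Int) (K1 : Int) (K2 : Int) (W : List Int) (V : List Int), Dom_solution N K1 K2 W V → Pre_solution N K1 K2 W V → Spec_solution N K1 K2 W V (solution N K1 K2 W V)

-- ===== LEMMAS AND PROOFS =====

-- shifting the accumulator shifts only the answer component
lemma pvLoopA_shift (l : List (Int × Int)) : ∀ (k a c : Int),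
    pvLoopA l k (a + c) = ((pvLoopA l k a).1 + c, (pvLoopA l k a).2.1, (pvLoopA l k a).2.2) := by
  induction l with
  | nil => intro k a c; simp [pvLoopA]
  | cons p t ih =>
    intro k a c
    obtain ⟨w, v⟩ := p
    by_cases h : w ≤ k
    · simp only [pvLoopA, if_pos h]
      rw [show a + c + v = (a + v) + c by ring, ih]
    · simp [pvLoopA, if_neg h, ih]

-- A's two sequential passes equal B's single fused pass
lemma pvLoop_fuse (l : List (Int × Int)) : ∀ (k1 k2 acc : Int),
    (pvLoopA (pvLoopA l k1 acc).2.2 k2 (pvLoopA l k1 acc).1).1 = pvLoopB l k1 k2 acc := by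
  induction l with
  | nil => intro k1 k2 acc; simp [pvLoopA, pvLoopB]
  | cons p t ih =>
    intro k1 k2 acc
    obtain ⟨w, v⟩ := p
    by_cases h1 : w ≤ k1
    · simp only [pvLoopA, pvLoopB, if_pos h1]
      exact ih (k1 - w) k2 (acc + v)
    · by_cases h2 : w ≤ k2
      · simp only [pvLoopA, pvLoopB, if_neg h1, if_pos h2]
        rw [← ih k1 (k2 - w) (acc + v), pvLoopA_shift t k1 acc v]
      · simp only [pvLoopA, pvLoopB, if_neg h1, if_neg h2]
        exact ih k1 k2 acc

-- under the precondition, A's index-building loop builds exactly zip(W, V)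
lemma pvBuild_eq_zip (W V : List Int) (h : W.length ≤ V.length) : pvBuild W V = W.zip V := by
  unfold pvBuild
  rw [PySem.List.foldl_append_singleton_eq_map, List.nil_append]
  apply List.ext_getElem
  · simp [PySem.List.length_pyRange_one, Nat.min_eq_left h]
  · intro k hk1 hk2
    have hkW : k < W.length := by
      simpa [PySem.List.length_pyRange_one] using hk1
    have hkV : k < V.length := lt_of_lt_of_le hkW h
    simp only [List.getElem_map, List.getElem_zip, PySem.List.getElem_pyRange_one, zero_add,
      PySem.List.pyGetD_natCast]
    rw [List.getD_eq_getElem _ _ hkW, List.getD_eq_getElem _ _ hkV]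

-- ===== VERDICT (by name: the statement is the Claim_ definition above) =====
theorem solution_spec : Claim_equal_solution := by
  intro N K1 K2 W V _ hpre
  unfold Spec_solution solution solution_alt
  rw [pvBuild_eq_zip W V hpre]
  exact pvLoop_fuse _ K1 K2 0
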